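-- pv_equiv track=rewrite | github.com/ceban-vasile/CS | Laboratory_work_2/analyzer.py | count_doubles
-- ===== SOURCE A (Python) =====
-- def count_doubles(text):
--     double_count = {}
--     text = text.upper()
--
--     for i in range(len(text) - 1):
--         if text[i] == text[i + 1]:
--             double = text[i:i + 2]
--             if double in double_count:
--                 double_count[double] += 1
--             else:
--                 double_count[double] = 1
--
--     sorted_doubles = sorted(double_count.items(), key=lambda item: item[1], reverse=True)
--     return dict(sorted_doubles[:7])
-- ===== SOURCE B (Python) =====
-- def count_doubles(text):
--     t = text.upper()
--     n = len(t)
--     counts = {}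
--     i = 0
--     while i < n:
--         j = i + 1
--         while j < n and t[j] == t[i]:
--             j += 1
--         if j - i >= 2:
--             key = t[i] * 2
--             counts[key] = counts.get(key, 0) + (j - i - 1)
--         i = j
--     return dict(sorted(counts.items(), key=lambda kv: kv[1], reverse=True)[:7])
-- ===== Notes on version B (the rewrite author's own statement) =====
-- stated objective: alternative
-- what changed: Per-index scan that increments a dict once per adjacent equal pair is replaced by a run-length two-pointer scan that adds L-1 per maximal run of length L in a single dict update.
import Mathlib
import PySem

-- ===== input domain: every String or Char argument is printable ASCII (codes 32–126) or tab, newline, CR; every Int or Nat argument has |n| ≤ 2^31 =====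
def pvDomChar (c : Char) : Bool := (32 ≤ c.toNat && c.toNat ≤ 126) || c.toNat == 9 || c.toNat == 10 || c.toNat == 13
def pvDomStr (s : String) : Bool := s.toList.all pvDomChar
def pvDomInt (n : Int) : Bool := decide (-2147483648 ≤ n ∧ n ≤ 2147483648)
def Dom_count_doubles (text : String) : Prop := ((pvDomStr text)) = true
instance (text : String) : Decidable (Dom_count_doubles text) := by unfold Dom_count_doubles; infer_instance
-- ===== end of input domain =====

-- B replaces A's per-index adjacent-pair counting loop with a run-length two-pointer scan
-- (one dict update of L-1 per maximal run of length L); alternative decomposition, same cost.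

-- ===== PORT A =====
-- literal transliteration of A: for i in range(len(t)-1), count each adjacent equal pair
-- (key = the two-char slice t[i:i+2]) in a dict, sort items by value descending, keep the first 7
def count_doubles (text : String) : List (String × Int) :=
  let u := PySem.Chars.upper text.toList
  let dc := (PySem.List.pyRange 0 ((u.length : Int) - 1) 1).foldl (fun d i =>
    match PySem.List.pyGet? u i, PySem.List.pyGet? u (i + 1) with
    | some a, some b =>
      if a == b then
        let dbl := String.ofList (PySem.List.slice u (some i) (some (i + 2)))
        if d.contains dbl then d.insert dbl (d.getD dbl 0 + 1) else d.insert dbl 1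
      else d
    | _, _ => d) PySem.Dict.empty
  (PySem.Dict.ofList (PySem.List.slice (PySem.List.sorted dc.items (fun item => item.2) true) none (some 7))).items

-- ===== PORT B =====
-- transliteration of Source B's outer while-loop: each iteration consumes one maximal run;
-- the inner 'while j < n and t[j] == t[i]' scan is the takeWhile/dropWhile split of the rest
def countRuns (u : List Char) (d : PySem.Dict String Int) : PySem.Dict String Int :=
  match u with
  | [] => d
  | c :: rest =>
    let run := rest.takeWhile (· == c)
    let d' := if 2 ≤ run.length + 1 then
        (let key := String.ofList [c, c]
         d.insert key (d.getD key 0 + (((run.length : Int) + 1) - 1)))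
      else d
    countRuns (rest.dropWhile (· == c)) d'
termination_by u.length
decreasing_by
  simp only [List.length_cons]
  exact Nat.lt_succ_of_le (List.length_dropWhile_le _ _)

def count_doubles_alt (text : String) : List (String × Int) :=
  let u := PySem.Chars.upper text.toList
  let dc := countRuns u PySem.Dict.empty
  (PySem.Dict.ofList (PySem.List.slice (PySem.List.sorted dc.items (fun kv => kv.2) true) none (some 7))).items

-- ===== PRECONDITION & SPEC =====
def Spec_count_doubles (text : String) (out : List (String × Int)) : Prop := out = count_doubles_alt text
instance (text : String) (out : List (String × Int)) : Decidable (Spec_count_doubles text out) := by unfold Spec_count_doubles; infer_instance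

-- ===== CLAIM (what is proved, stated in full; the proofs are below) =====
def Claim_equal_count_doubles : Prop := ∀ (text : String), Dom_count_doubles text → Spec_count_doubles text (count_doubles text)

-- ===== LEMMAS AND PROOFS =====

-- proof-side intermediate: A's index loop seen as structural recursion over adjacent pairs
def pairLoop (u : List Char) (d : PySem.Dict String Int) : PySem.Dict String Int :=
  match u with
  | a :: b :: rest =>
    pairLoop (b :: rest)
      (if a == b then
        (let dbl := String.ofList [a, b]
         if d.contains dbl then d.insert dbl (d.getD dbl 0 + 1) else d.insert dbl 1)
      else d)
  | _ => d

-- A's loop body with the index already a natural number and the slice evaluated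
def gA (u : List Char) (d : PySem.Dict String Int) (i : Nat) : PySem.Dict String Int :=
  match u[i]?, u[i+1]? with
  | some a, some b =>
    if a == b then
      let dbl := String.ofList ((u.drop i).take 2)
      if d.contains dbl then d.insert dbl (d.getD dbl 0 + 1) else d.insert dbl 1
    else d
  | _, _ => d

theorem range_foldl_eq_pairLoop (u : List Char) :
    ∀ d, (List.range (u.length - 1)).foldl (gA u) d = pairLoop u d := by
  induction u with
  | nil => intro d; simp [pairLoop]
  | cons a t ih =>
    cases t with
    | nil => intro d; simp [pairLoop]
    | cons b rest =>
      intro d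
      have hlen : (a :: b :: rest).length - 1 = rest.length + 1 := by simp
      rw [hlen, List.range_succ_eq_map, List.foldl_cons, List.foldl_map]
      have h0 : gA (a :: b :: rest) d 0 =
          (if a == b then
            (let dbl := String.ofList [a, b]
             if d.contains dbl then d.insert dbl (d.getD dbl 0 + 1) else d.insert dbl 1)
          else d) := by
        simp [gA]
      rw [h0]
      rw [PySem.List.foldl_congr_mem _ _ (gA (b :: rest)) _ (by
        intro acc i _
        simp [gA, Nat.succ_eq_add_one])]
      have := ih (d := (if a == b then
            (let dbl := String.ofList [a, b]
             if d.contains dbl then d.insert dbl (d.getD dbl 0 + 1) else d.insert dbl 1)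
          else d))
      simp at this ⊢
      rw [this]
      conv_rhs => rw [pairLoop]
      simp

theorem foldA_eq_pairLoop (u : List Char) (d : PySem.Dict String Int) :
    (PySem.List.pyRange 0 ((u.length : Int) - 1) 1).foldl (fun d i =>
      match PySem.List.pyGet? u i, PySem.List.pyGet? u (i + 1) with
      | some a, some b =>
        if a == b then
          let dbl := String.ofList (PySem.List.slice u (some i) (some (i + 2)))
          if d.contains dbl then d.insert dbl (d.getD dbl 0 + 1) else d.insert dbl 1
        else d
      | _, _ => d) d = pairLoop u d := by
  rw [← range_foldl_eq_pairLoop u d]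
  cases u with
  | nil =>
    have h : PySem.List.pyRange 0 (((List.length ([] : List Char)) : Int) - 1) 1 = [] := by decide
    rw [h]; simp
  | cons c t =>
    have h : (((c :: t).length : Int) - 1) = ((t.length : Nat) : Int) := by simp
    rw [h, PySem.List.pyRange_zero_natCast, List.foldl_map]
    have hl : (c :: t).length - 1 = t.length := by simp
    rw [hl]
    refine PySem.List.foldl_congr_mem _ _ _ _ ?_
    intro acc k _
    have h2 : ((k : Int) + 2) = ((k : Int) + ((2 : Nat) : Int)) := by push_cast; ring
    have h1 : ((k : Int) + 1) = (((k + 1 : Nat) : Int)) := by push_cast; ring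
    simp only [h1, h2, PySem.List.slice_natCast_add, PySem.List.pyGet?_natCast, gA]

-- A's per-pair increment is one unconditional insert
theorem inc_eq (d : PySem.Dict String Int) (key : String) :
    (if d.contains key then d.insert key (d.getD key 0 + 1) else d.insert key 1) =
      d.insert key (d.getD key 0 + 1) := by
  by_cases h : d.contains key
  · simp [h]
  · simp only [Bool.not_eq_true] at h
    rw [PySem.Dict.getD_of_not_contains d 0 h]
    simp [h]

-- a maximal run of k+1 copies of c contributes k increments of the key "cc", collapsed into one insert
theorem pairLoop_run (c : Char) (tail : List Char)
    (htail : ∀ x, tail.head? = some x → (x == c) = false) :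
    ∀ (k : Nat) (d : PySem.Dict String Int),
    pairLoop (c :: (List.replicate k c ++ tail)) d =
      pairLoop tail (if k = 0 then d else
        d.insert (String.ofList [c, c]) (d.getD (String.ofList [c, c]) 0 + (k : Int))) := by
  intro k
  induction k with
  | zero =>
    intro d
    cases tail with
    | nil => simp [pairLoop]
    | cons t ts =>
      have hx := htail t rfl
      have : (c == t) = false := by
        cases hbeq : c == t
        · rfl
        · exfalso; have : c = t := by simpa using hbeq
          subst this; simp at hx
      simp only [List.replicate, List.nil_append]
      rw [pairLoop]
      simp [this]
  | succ k ih =>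
    intro d
    rw [List.replicate_succ]
    have step : pairLoop (c :: c :: (List.replicate k c ++ tail)) d =
        pairLoop (c :: (List.replicate k c ++ tail))
          (d.insert (String.ofList [c, c]) (d.getD (String.ofList [c, c]) 0 + 1)) := by
      rw [pairLoop]
      simp only [BEq.rfl, if_pos]
      rw [inc_eq]
    simp only [List.cons_append] at step ⊢
    rw [step, ih]
    by_cases hk : k = 0
    · subst hk; simp
    · rw [if_neg hk, if_neg (by omega)]
      rw [PySem.Dict.getD_insert_self, PySem.Dict.insert_insert_self]
      congr 1
      push_cast
      ring_nf

theorem pairLoop_eq_countRuns_fuel :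
    ∀ (n : Nat) (u : List Char), u.length ≤ n → ∀ d, pairLoop u d = countRuns u d := by
  intro n
  induction n with
  | zero =>
    intro u hu d
    have : u = [] := by cases u <;> simp_all
    subst this
    simp [pairLoop, countRuns]
  | succ n ih =>
    intro u hu d
    cases u with
    | nil => simp [pairLoop, countRuns]
    | cons c rest =>
      have hsplit : rest.takeWhile (· == c) ++ rest.dropWhile (· == c) = rest :=
        List.takeWhile_append_dropWhile
      have hrepl : rest.takeWhile (· == c) = List.replicate (rest.takeWhile (· == c)).length c := by
        apply List.eq_replicate_of_mem
        intro b hb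
        simpa using List.mem_takeWhile_imp hb
      have htail : ∀ x, (rest.dropWhile (· == c)).head? = some x → (x == c) = false := by
        intro x hx
        have := List.head?_dropWhile_not (· == c) rest
        simp [hx] at this
        simpa using this
      have h1 : pairLoop (c :: rest) d =
          pairLoop (rest.dropWhile (· == c))
            (if (rest.takeWhile (· == c)).length = 0 then d else
              d.insert (String.ofList [c, c])
                (d.getD (String.ofList [c, c]) 0 + ((rest.takeWhile (· == c)).length : Int))) := by
        conv_lhs => rw [show (c :: rest) = c :: (List.replicate (rest.takeWhile (· == c)).length c ++ rest.dropWhile (· == c)) by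
          rw [← hrepl, hsplit]]
        exact pairLoop_run c _ htail _ d
      rw [h1, countRuns]
      have hlen : (rest.dropWhile (· == c)).length ≤ n := by
        have := List.length_dropWhile_le (· == c) rest
        simp at hu
        omega
      rw [ih _ hlen]
      congr 1
      by_cases hk : (rest.takeWhile (· == c)).length = 0
      · simp [hk]
      · rw [if_neg hk, if_pos (by omega)]
        congr 1
        ring_nf

theorem pairLoop_eq_countRuns (u : List Char) (d : PySem.Dict String Int) :
    pairLoop u d = countRuns u d :=
  pairLoop_eq_countRuns_fuel u.length u le_rfl d

-- ===== VERDICT (by name: the statement is the Claim_ definition above) =====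
theorem count_doubles_spec : Claim_equal_count_doubles := by
  intro text _
  unfold Spec_count_doubles count_doubles count_doubles_alt
  simp only [foldA_eq_pairLoop, pairLoop_eq_countRuns]
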